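-- pv_equiv track=rewrite | github.com/romeorizzi/temi_prog_public | 2019.02.27.recupero/conta-minimi-storici/sol/soluzione_py.py | conta_minimi_storici
-- ===== SOURCE A (Python) =====
-- def conta_minimi_storici(st_list, p):
--     if st_list[0] %2 == p:
--         counter = 1
--     else:
--         counter = 0
--     min_so_far = st_list[0]
--     for dato in st_list:
--         if dato < min_so_far:
--             min_so_far = dato
--             if dato %2 == p:
--                 counter = counter +1
--     return counter
-- ===== SOURCE B (Python) =====
-- def conta_minimi_storici(st_list, p):
--     # brute force: an element is a record low iff it is smaller than EVERY
--     # element seen before it; no running minimum is kept.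
--     seen = []
--     count = 0
--     for x in st_list:
--         if x % 2 == p and all(x < y for y in seen):
--             count += 1
--         seen.append(x)
--     return count
-- ===== Notes on version B (the rewrite author's own statement) =====
-- stated objective: alternative
-- what changed: B drops A's running-minimum accumulator entirely and uses the brute-force definition of a record low: it keeps the explicit list of previously seen elements and counts x iff x is smaller than every element of that prefix (O(n^2) all-comparison instead of A's O(n) single running-min compare).
import Mathlib
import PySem

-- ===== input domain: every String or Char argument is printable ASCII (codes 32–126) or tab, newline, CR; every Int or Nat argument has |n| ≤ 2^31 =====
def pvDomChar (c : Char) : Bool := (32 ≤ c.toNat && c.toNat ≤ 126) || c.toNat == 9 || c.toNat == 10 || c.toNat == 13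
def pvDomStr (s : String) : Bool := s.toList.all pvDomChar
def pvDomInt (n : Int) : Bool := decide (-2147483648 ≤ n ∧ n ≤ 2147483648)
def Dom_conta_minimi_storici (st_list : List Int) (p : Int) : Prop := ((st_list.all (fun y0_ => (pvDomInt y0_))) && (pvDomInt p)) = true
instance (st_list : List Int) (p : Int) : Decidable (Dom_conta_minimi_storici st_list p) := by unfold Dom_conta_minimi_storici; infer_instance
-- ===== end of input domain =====

-- B replaces A's running-minimum scan by the brute-force record definition (count x iff x is smaller than every previously seen element, kept as an explicit prefix list); equal on non-empty lists (A raises IndexError on [], where B returns 0).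


-- ===== PORT A =====
-- transliteration of A: counter initialised from st_list[0]'s parity, then one fused
-- loop over the WHOLE list threading (counter, min_so_far)
def conta_minimi_storici (st_list : List Int) (p : Int) : Int :=
  match st_list with
  | [] => 0   -- unreachable under Pre_: Python raises IndexError on st_list[0]
  | h :: _ =>
    let counter : Int := if PySem.Int.mod h 2 == p then 1 else 0
    let st := st_list.foldl
      (fun (s : Int × Int) dato =>
        if dato < s.2 then
          (if PySem.Int.mod dato 2 == p then s.1 + 1 else s.1, dato)
        else s)
      (counter, h)
    st.1

-- ===== PORT B =====
-- transliteration of B: thread (seen, count); x is counted iff its parity matches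
-- and x is smaller than every element of the seen prefix (no running minimum)
def conta_minimi_storici_alt (st_list : List Int) (p : Int) : Int :=
  (st_list.foldl
    (fun (s : List Int × Int) x =>
      (s.1 ++ [x],
       if (PySem.Int.mod x 2 == p) && s.1.all (fun y => decide (x < y)) then s.2 + 1 else s.2))
    (([] : List Int), (0 : Int))).2

-- ===== PRECONDITION & SPEC =====
-- Pre_ excludes only the empty list, on which A raises IndexError (st_list[0]).
def Pre_conta_minimi_storici (st_list : List Int) (p : Int) : Prop := st_list ≠ []
instance (st_list : List Int) (p : Int) : Decidable (Pre_conta_minimi_storici st_list p) := by unfold Pre_conta_minimi_storici; infer_instance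
def pvWitness_conta_minimi_storici : List Int × Int := ([5, 3, 4, 2], 0)

def Spec_conta_minimi_storici (st_list : List Int) (p : Int) (out : Int) : Prop := out = conta_minimi_storici_alt st_list p
instance (st_list : List Int) (p : Int) (out : Int) : Decidable (Spec_conta_minimi_storici st_list p out) := by unfold Spec_conta_minimi_storici; infer_instance

-- ===== CLAIM (what is proved, stated in full; the proofs are below) =====
def Claim_equal_conta_minimi_storici : Prop := ∀ (st_list : List Int) (p : Int), Dom_conta_minimi_storici st_list p → Pre_conta_minimi_storici st_list p → Spec_conta_minimi_storici st_list p (conta_minimi_storici st_list p)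

-- ===== LEMMAS AND PROOFS =====

-- Invariant linking the two folds: if m is a minimum element of B's seen prefix,
-- then B's all-comparison test 'x < every y in seen' is 'x < m', so both folds
-- accumulate the same count over the remaining tail.
theorem pv_fold_inv (p : Int) :
    ∀ (t seen : List Int) (c m : Int), m ∈ seen → (∀ y ∈ seen, m ≤ y) →
      (t.foldl
        (fun (s : List Int × Int) x =>
          (s.1 ++ [x],
           if (PySem.Int.mod x 2 == p) && s.1.all (fun y => decide (x < y)) then s.2 + 1 else s.2))
        (seen, c)).2
      = (t.foldl
          (fun (s : Int × Int) dato =>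
            if dato < s.2 then
              (if PySem.Int.mod dato 2 == p then s.1 + 1 else s.1, dato)
            else s)
          (c, m)).1 := by
  intro t
  induction t with
  | nil => intro seen c m _ _; rfl
  | cons d t ih =>
    intro seen c m hmem hmin
    simp only [List.foldl_cons]
    by_cases hd : d < m
    · have hall : seen.all (fun y => decide (d < y)) = true := by
        simp only [List.all_eq_true, decide_eq_true_eq]
        intro y hy; exact lt_of_lt_of_le hd (hmin y hy)
      rw [hall, Bool.and_true, if_pos hd]
      have hmem' : d ∈ seen ++ [d] := by simp
      have hmin' : ∀ y ∈ seen ++ [d], d ≤ y := by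
        intro y hy
        rcases List.mem_append.1 hy with h | h
        · exact le_of_lt (lt_of_lt_of_le hd (hmin y h))
        · simp at h; omega
      by_cases hp : (PySem.Int.mod d 2 == p) = true
      · rw [if_pos hp]
        exact ih (seen ++ [d]) (c + 1) d hmem' hmin'
      · rw [if_neg hp]
        exact ih (seen ++ [d]) c d hmem' hmin'
    · have hall : seen.all (fun y => decide (d < y)) = false := by
        simp only [List.all_eq_false]
        exact ⟨m, hmem, by simpa using hd⟩
      rw [hall, Bool.and_false, if_neg (by simp), if_neg hd]
      have hmin' : ∀ y ∈ seen ++ [d], m ≤ y := by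
        intro y hy
        rcases List.mem_append.1 hy with h | h
        · exact hmin y h
        · simp at h; omega
      exact ih (seen ++ [d]) c m (List.mem_append_left _ hmem) hmin'

-- ===== VERDICT (by name: the statements are the Claim_ definitions above) =====
theorem conta_minimi_storici_spec : Claim_equal_conta_minimi_storici := by
  intro st_list p _ hpre
  match st_list with
  | [] => exact absurd rfl hpre
  | h :: t =>
    show conta_minimi_storici (h :: t) p = conta_minimi_storici_alt (h :: t) p
    simp only [conta_minimi_storici, conta_minimi_storici_alt, List.foldl_cons]
    rw [if_neg (lt_irrefl h)]
    by_cases hp : (PySem.Int.mod h 2 == p) = true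
    · rw [if_pos hp, if_pos (by simpa using hp), List.nil_append]
      exact (pv_fold_inv p t [h] 1 h (by simp) (by simp)).symm
    · rw [if_neg hp, if_neg (by simpa using hp), List.nil_append]
      exact (pv_fold_inv p t [h] 0 h (by simp) (by simp)).symm
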